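-- pv_equiv track=rewrite | github.com/SlavikMironov/adventofcode | 2024/day 12/day12.py | travel_part_two
-- ===== SOURCE A (Python) =====
-- def travel_part_two(garden, coordinate):
--     row, col = coordinate
--     visited = set()
--     sides = 0
--
--     def dfs(row, col):
--         if (row, col) in visited:
--             return
--         visited.add((row, col))
--
--         for dr, dc in [(1, 0), (-1, 0), (0, 1), (0, -1)]:
--             nr, nc = row + dr, col + dc
--             if is_valid(garden, (row, col), (nr, nc), len(garden), len(garden[0])):
--                 dfs(nr, nc)
--
--     dfs(row, col)
--
--     for i, j in visited:
--         for first_neighbor, second_neighbor in [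
--             ((-1, 0), (0, 1)),
--             ((1, 0), (0, -1)),
--             ((-1, 0), (0, -1)),
--             ((1, 0), (0, 1)),
--         ]:
--             fr, fc = first_neighbor
--             sr, sc = second_neighbor
--             fr, fc, sr, sc = i + fr, j + fc, i + sr, j + sc
--             if not is_valid(
--                 garden, (row, col), (fr, fc), len(garden), len(garden[0])
--             ) and not is_valid(
--                 garden, (row, col), (sr, sc), len(garden), len(garden[0])
--             ):
--                 sides += 1
--             elif is_valid(
--                 garden,
--                 (row, col),
--                 (fr, fc),
--                 len(garden),
--                 len(garden[0]),
--             ) and is_valid(garden, (row, col), (sr, sc), len(garden), len(garden[0])):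
--                 fr, fc = first_neighbor
--                 sr, sc = second_neighbor
--                 diag_r, diag_c = i + fr, j + sc
--                 if not is_valid(
--                     garden, (row, col), (diag_r, diag_c), len(garden), len(garden[0])
--                 ):
--                     sides += 1
--
--     return (
--         len(visited),
--         sides,
--         visited,
--     )
--
-- def is_valid(garden, curr_coor, next_coor, row_len, col_len):
--     return (
--         0 <= next_coor[0] < row_len
--         and 0 <= next_coor[1] < col_len
--         and garden[next_coor[0]][next_coor[1]] == garden[curr_coor[0]][curr_coor[1]]
--     )
-- ===== SOURCE B (Python) =====
-- def travel_part_two(garden, coordinate):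
--     row, col = coordinate
--     rows, cols = len(garden), len(garden[0])
--
--     def ok(r, c):
--         return 0 <= r < rows and 0 <= c < cols and garden[r][c] == garden[row][col]
--
--     visited = set()
--     stack = [coordinate]
--     while stack:
--         r, c = stack.pop()
--         if (r, c) in visited:
--             continue
--         visited.add((r, c))
--         for nr, nc in ((r, c - 1), (r, c + 1), (r - 1, c), (r + 1, c)):
--             if ok(nr, nc):
--                 stack.append((nr, nc))
--
--     sides = sum(
--         corner_contrib(ok, i, j, dv, dh)
--         for i, j in visited
--         for dv, dh in ((-1, 1), (1, -1), (-1, -1), (1, 1))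
--     )
--     return (len(visited), sides, visited)
--
--
-- def corner_contrib(ok, i, j, dv, dh):
--     a = ok(i + dv, j)
--     b = ok(i, j + dh)
--     if a != b:
--         return 0
--     if not a:
--         return 1
--     return 0 if ok(i + dv, j + dh) else 1
-- ===== Notes on version B (the rewrite author's own statement) =====
-- stated objective: alternative
-- what changed: The recursive dfs helper is replaced by an iterative stack flood fill whose neighbour test compares against the start cell's plant once (a local ok closure), and the nested accumulator corner loop with its re-evaluated is_valid tests is replaced by summing a separate per-corner contribution function over all cells and the four diagonal directions.
-- outside the precondition, e.g. on travel_part_two([['A', 'A'], ['B']], (0, 0)): A raises IndexError, B raises IndexError; on travel_part_two([['A'], ['B', 'B']], (0, 0)): A returns (1, 4, {(0, 0)}), B returns (1, 4, {(0, 0)})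
import Mathlib
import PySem

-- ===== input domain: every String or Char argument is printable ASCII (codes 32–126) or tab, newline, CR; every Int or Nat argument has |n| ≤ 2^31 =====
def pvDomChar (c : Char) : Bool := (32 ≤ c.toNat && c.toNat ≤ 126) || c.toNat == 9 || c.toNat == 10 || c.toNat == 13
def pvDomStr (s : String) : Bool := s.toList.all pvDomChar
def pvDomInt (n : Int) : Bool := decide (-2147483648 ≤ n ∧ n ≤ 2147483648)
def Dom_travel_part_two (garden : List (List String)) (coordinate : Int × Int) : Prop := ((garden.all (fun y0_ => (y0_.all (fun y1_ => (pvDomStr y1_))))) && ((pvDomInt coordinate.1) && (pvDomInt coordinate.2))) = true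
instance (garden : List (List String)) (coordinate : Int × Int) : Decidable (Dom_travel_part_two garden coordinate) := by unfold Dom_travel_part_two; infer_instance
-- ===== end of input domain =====

-- B replaces the recursive dfs by an iterative stack flood fill testing neighbours against
-- the start cell's plant, and counts sides by summing a per-corner contribution function
-- over all cells instead of A's nested accumulator loop with re-tested conditions; same cost.

-- ===== PORT A =====
-- garden[p.1][p.2]; inside Pre_ every lookup is in range, where pyGet? is exact.
def pvCell (garden : List (List String)) (p : Int × Int) : String :=
  (PySem.List.pyGet? ((PySem.List.pyGet? garden p.1).getD []) p.2).getD ""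

-- module-level helper is_valid of the original Python
def pvIsValid (garden : List (List String)) (cur nxt : Int × Int) (rowLen colLen : Int) : Bool :=
  decide (0 ≤ nxt.1) && decide (nxt.1 < rowLen) && decide (0 ≤ nxt.2) && decide (nxt.2 < colLen)
    && (pvCell garden nxt == pvCell garden cur)

def pvNbr (c d : Int × Int) : Int × Int := (c.1 + d.1, c.2 + d.2)

def pvDirsA : List (Int × Int) := [(1, 0), (-1, 0), (0, 1), (0, -1)]

-- A's corner direction pairs
def pvPairs : List ((Int × Int) × (Int × Int)) :=
  [((-1, 0), (0, 1)), ((1, 0), (0, -1)), ((-1, 0), (0, -1)), ((1, 0), (0, 1))]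

-- A's recursive dfs; fuel (rows*cols+2 at the call site) only totalizes the recursion
def pvDfsA (garden : List (List String)) (rowLen colLen : Int) :
    Nat → PySem.Set (Int × Int) → Int × Int → PySem.Set (Int × Int)
  | 0, vis, _ => vis
  | f + 1, vis, cur =>
    if PySem.Set.contains vis cur then vis
    else pvDirsA.foldl
      (fun v d => if pvIsValid garden cur (pvNbr cur d) rowLen colLen
                  then pvDfsA garden rowLen colLen f v (pvNbr cur d) else v)
      (PySem.Set.add vis cur)

-- A's corner-counting loop (each is_valid test re-evaluated, as in the Python)
def pvSidesA (garden : List (List String)) (start : Int × Int) (rowLen colLen : Int)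
    (vis : List (Int × Int)) : Int :=
  vis.foldl (fun sides ij =>
    pvPairs.foldl (fun sides pr =>
      if !(pvIsValid garden start (pvNbr ij pr.1) rowLen colLen)
          && !(pvIsValid garden start (pvNbr ij pr.2) rowLen colLen) then sides + 1
      else if pvIsValid garden start (pvNbr ij pr.1) rowLen colLen
          && pvIsValid garden start (pvNbr ij pr.2) rowLen colLen then
        if !(pvIsValid garden start (ij.1 + pr.1.1, ij.2 + pr.2.2) rowLen colLen)
        then sides + 1 else sides
      else sides) sides) 0

def travel_part_two (garden : List (List String)) (coordinate : Int × Int) :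
    Int × Int × (List (Int × Int)) :=
  let rowLen : Int := (garden.length : Int)
  let row0 := (PySem.List.pyGet? garden 0).getD []
  let colLen : Int := (row0.length : Int)
  let vis := pvDfsA garden rowLen colLen (garden.length * row0.length + 2) PySem.Set.empty coordinate
  (PySem.Set.len vis, pvSidesA garden coordinate rowLen colLen vis, vis)

-- ===== PORT B =====
-- Source B's closure ok: in bounds and same plant as the start cell (plant read lazily, as in Python)
def pvOk (garden : List (List String)) (rows cols : Int) (start : Int × Int)
    (p : Int × Int) : Bool :=
  if 0 ≤ p.1 ∧ p.1 < rows ∧ 0 ≤ p.2 ∧ p.2 < cols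
  then pvCell garden p == pvCell garden start else false

-- the inner for-loop of Source B's while: push each ok neighbour (head = top of stack)
def pvStep (ok : Int × Int → Bool) (r c : Int) (st : List (Int × Int)) : List (Int × Int) :=
  [(r, c - 1), (r, c + 1), (r - 1, c), (r + 1, c)].foldl
    (fun s n => if ok n then n :: s else s) st

-- Source B's while loop; fuel only totalizes it (consumed when a cell is added)
def pvFill (ok : Int × Int → Bool) :
    Nat → PySem.Set (Int × Int) → List (Int × Int) → PySem.Set (Int × Int)
  | _, vis, [] => vis
  | f, vis, c :: st =>
    if PySem.Set.contains vis c then pvFill ok f vis st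
    else match f with
      | 0 => vis
      | f + 1 => pvFill ok f (PySem.Set.add vis c) (pvStep ok c.1 c.2 st)
  termination_by f _ st => (f, st.length)

-- Source B's corner_contrib
def pvCorner (ok : Int × Int → Bool) (i j dv dh : Int) : Int :=
  let a := ok (i + dv, j)
  let b := ok (i, j + dh)
  if a != b then 0
  else if !a then 1
  else if ok (i + dv, j + dh) then 0 else 1

def pvCornerDirs : List (Int × Int) := [(-1, 1), (1, -1), (-1, -1), (1, 1)]

def travel_part_two_alt (garden : List (List String)) (coordinate : Int × Int) :
    Int × Int × (List (Int × Int)) :=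
  let rows : Int := (garden.length : Int)
  let cols : Int := (((PySem.List.pyGet? garden 0).getD []).length : Int)
  let ok := pvOk garden rows cols coordinate
  let vis := pvFill ok (garden.length * ((PySem.List.pyGet? garden 0).getD []).length + 2)
    PySem.Set.empty [coordinate]
  (PySem.Set.len vis,
   (vis.flatMap (fun ij => pvCornerDirs.map (fun d => pvCorner ok ij.1 ij.2 d.1 d.2))).sum,
   vis)

-- ===== PRECONDITION & SPEC =====
-- Pre_ excludes the inputs on which A raises IndexError: the empty garden, and ragged
-- gardens or out-of-wrap-range start coordinates whose exploration indexes past a row end;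
-- ragged/far configurations are admitted when the start's four neighbours are all out of
-- bounds, where A touches no cell at all. A few ragged inputs whose scan happens to stay
-- clear of the short rows still return in A and are conservatively excluded here.
def Pre_travel_part_two (garden : List (List String)) (coordinate : Int × Int) : Prop :=
  garden ≠ [] ∧
    (((∀ r ∈ garden, r.length = (garden.headD []).length) ∧
        -(garden.length : Int) ≤ coordinate.1 ∧ coordinate.1 < (garden.length : Int) ∧
        -((garden.headD []).length : Int) ≤ coordinate.2 ∧
        coordinate.2 < ((garden.headD []).length : Int)) ∨
      ((¬ (0 ≤ coordinate.1 + 1 ∧ coordinate.1 + 1 < (garden.length : Int) ∧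
            0 ≤ coordinate.2 ∧ coordinate.2 < ((garden.headD []).length : Int))) ∧
       (¬ (0 ≤ coordinate.1 - 1 ∧ coordinate.1 - 1 < (garden.length : Int) ∧
            0 ≤ coordinate.2 ∧ coordinate.2 < ((garden.headD []).length : Int))) ∧
       (¬ (0 ≤ coordinate.1 ∧ coordinate.1 < (garden.length : Int) ∧
            0 ≤ coordinate.2 + 1 ∧ coordinate.2 + 1 < ((garden.headD []).length : Int))) ∧
       (¬ (0 ≤ coordinate.1 ∧ coordinate.1 < (garden.length : Int) ∧
            0 ≤ coordinate.2 - 1 ∧ coordinate.2 - 1 < ((garden.headD []).length : Int)))))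

instance (garden : List (List String)) (coordinate : Int × Int) :
    Decidable (Pre_travel_part_two garden coordinate) := by
  unfold Pre_travel_part_two; infer_instance

def pvWitness_travel_part_two : List (List String) × (Int × Int) :=
  ([["A", "A"], ["A", "B"]], (0, 0))

def Spec_travel_part_two (garden : List (List String)) (coordinate : Int × Int)
    (out : Int × Int × (List (Int × Int))) : Prop := out = travel_part_two_alt garden coordinate
instance (garden : List (List String)) (coordinate : Int × Int) (out : Int × Int × (List (Int × Int))) : Decidable (Spec_travel_part_two garden coordinate out) := by unfold Spec_travel_part_two; infer_instance

-- ===== CLAIM (what is proved, stated in full; the proofs are below) =====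
def Claim_equal_travel_part_two : Prop := ∀ (garden : List (List String)) (coordinate : Int × Int), Dom_travel_part_two garden coordinate → Pre_travel_part_two garden coordinate → Spec_travel_part_two garden coordinate (travel_part_two garden coordinate)

-- ===== LEMMAS AND PROOFS =====

-- is_valid with cur = start is exactly Source B's ok
theorem pvOk_eq_isValid (garden : List (List String)) (rows cols : Int) (start p : Int × Int) :
    pvOk garden rows cols start p = pvIsValid garden start p rows cols := by
  unfold pvOk pvIsValid
  by_cases h : 0 ≤ p.1 ∧ p.1 < rows ∧ 0 ≤ p.2 ∧ p.2 < cols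
  · simp [h]
  · rw [if_neg h]
    push_neg at h
    by_cases h1 : 0 ≤ p.1
    · by_cases h2 : p.1 < rows
      · by_cases h3 : 0 ≤ p.2
        · have := h h1 h2 h3
          simp [h1, h2, h3, this]
        · simp [h3]
      · simp [h2]
    · simp [h1]

-- is_valid from any cell of the same plant as the start is Source B's ok
theorem pvOk_eq_isValid_cur (garden : List (List String)) (rows cols : Int)
    (start cur p : Int × Int) (h : pvCell garden cur = pvCell garden start) :
    pvIsValid garden cur p rows cols = pvOk garden rows cols start p := by
  rw [pvOk_eq_isValid]
  unfold pvIsValid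
  rw [h]

-- all grid cells; together with the start they bound the traversal
def pvAll (R C : Nat) : List (Int × Int) :=
  (List.range R).flatMap (fun (i : Nat) => (List.range C).map (fun (j : Nat) => ((i : Int), (j : Int))))

-- number of cells of a universe not yet visited: the traversal measure
def pvU (univ : List (Int × Int)) (vis : PySem.Set (Int × Int)) : Nat :=
  (univ.filter (fun p => !PySem.Set.contains vis p)).length

theorem pvMem_all {R C : Nat} {p : Int × Int} :
    p ∈ pvAll R C ↔ 0 ≤ p.1 ∧ p.1 < (R : Int) ∧ 0 ≤ p.2 ∧ p.2 < (C : Int) := by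
  obtain ⟨p1, p2⟩ := p
  constructor
  · intro h
    rw [pvAll, List.mem_flatMap] at h
    obtain ⟨i, hi, hmem⟩ := h
    rw [List.mem_map] at hmem
    obtain ⟨j, hj, heq⟩ := hmem
    rw [List.mem_range] at hi hj
    cases heq
    exact ⟨by omega, by omega, by omega, by omega⟩
  · rintro ⟨h1, h2, h3, h4⟩
    rw [pvAll, List.mem_flatMap]
    refine ⟨p1.toNat, ?_, ?_⟩
    · rw [List.mem_range]; omega
    · rw [List.mem_map]
      refine ⟨p2.toNat, ?_, ?_⟩
      · rw [List.mem_range]; omega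
      · rw [Int.toNat_of_nonneg h1, Int.toNat_of_nonneg h3]

theorem pvAll_length (R C : Nat) : (pvAll R C).length = R * C := by
  simp [pvAll, List.length_flatMap]

theorem pvContains_false {s : PySem.Set (Int × Int)} {x : Int × Int} :
    PySem.Set.contains s x = false ↔ x ∉ s := by
  constructor
  · intro h hm
    rw [(PySem.Set.contains_iff s x).mpr hm] at h
    exact Bool.noConfusion h
  · intro h
    cases hc : PySem.Set.contains s x
    · rfl
    · exact absurd ((PySem.Set.contains_iff s x).mp hc) h

theorem pvU_mono {univ : List (Int × Int)} {vis vis' : PySem.Set (Int × Int)} (h : vis ⊆ vis') :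
    pvU univ vis' ≤ pvU univ vis := by
  unfold pvU
  refine List.Sublist.length_le (List.monotone_filter_right _ ?_)
  intro a ha
  simp only [Bool.not_eq_true'] at ha ⊢
  rw [pvContains_false] at ha ⊢
  exact fun hm => ha (h hm)

theorem pvU_dec {univ : List (Int × Int)} {vis : PySem.Set (Int × Int)} {c : Int × Int}
    (hc : c ∈ univ) (hnv : c ∉ vis) : pvU univ (PySem.Set.add vis c) < pvU univ vis := by
  unfold pvU
  have hsub : (univ.filter (fun p => !PySem.Set.contains (PySem.Set.add vis c) p)).Sublist
      (univ.filter (fun p => !PySem.Set.contains vis p)) := by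
    refine List.monotone_filter_right _ ?_
    intro a ha
    simp only [Bool.not_eq_true'] at ha ⊢
    rw [pvContains_false] at ha ⊢
    exact fun hm => ha ((PySem.Set.mem_add vis c a).mpr (Or.inl hm))
  have hcin : c ∈ univ.filter (fun p => !PySem.Set.contains vis p) := by
    refine List.mem_filter.mpr ⟨hc, ?_⟩
    simp only [Bool.not_eq_true']
    rw [pvContains_false]
    exact hnv
  have hcout : c ∉ univ.filter (fun p => !PySem.Set.contains (PySem.Set.add vis c) p) := by
    intro hmem
    have h2 := (List.mem_filter.mp hmem).2
    simp only [Bool.not_eq_true'] at h2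
    rw [pvContains_false] at h2
    exact h2 ((PySem.Set.mem_add vis c c).mpr (Or.inr rfl))
  rcases lt_or_eq_of_le hsub.length_le with hlt | heq
  · exact hlt
  · exact absurd (hsub.eq_of_length heq ▸ hcin) hcout

theorem pvU_pos {univ : List (Int × Int)} {vis : PySem.Set (Int × Int)} {c : Int × Int}
    (hc : c ∈ univ) (hnv : c ∉ vis) : 1 ≤ pvU univ vis := by
  unfold pvU
  have hcin : c ∈ univ.filter (fun p => !PySem.Set.contains vis p) := by
    refine List.mem_filter.mpr ⟨hc, ?_⟩
    simp only [Bool.not_eq_true']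
    rw [pvContains_false]
    exact hnv
  have := List.length_pos_of_mem hcin
  omega

-- a foldl congruence under an invariant preserved by the left step
theorem pvFoldl_congr_inv {α β : Type} (P : α → Prop) (f g : α → β → α) (l : List β) (a : α)
    (hP : P a) (hpres : ∀ a x, P a → x ∈ l → P (f a x))
    (hag : ∀ a x, P a → x ∈ l → f a x = g a x) : l.foldl f a = l.foldl g a := by
  induction l generalizing a with
  | nil => rfl
  | cons x xs ih =>
    have hx : f a x = g a x := hag a x hP (by simp)
    simp only [List.foldl_cons, ← hx]
    exact ih (f a x) (hpres a x hP (by simp))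
      (fun a y hPa hy => hpres a y hPa (by simp [hy]))
      (fun a y hPa hy => hag a y hPa (by simp [hy]))

theorem pvSubset_foldl {α β : Type} {l : List β} {step : List α → β → List α} {a : List α}
    (h : ∀ a x, x ∈ l → a ⊆ step a x) : a ⊆ l.foldl step a := by
  induction l generalizing a with
  | nil => exact fun _ h => h
  | cons x xs ih =>
    exact (h a x (by simp)).trans (ih (fun a y hy => h a y (by simp [hy])))

theorem pvDfsA_of_mem (garden : List (List String)) (rowLen colLen : Int) (f : Nat)
    (vis : PySem.Set (Int × Int)) (cur : Int × Int) (h : PySem.Set.contains vis cur = true) :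
    pvDfsA garden rowLen colLen f vis cur = vis := by
  cases f
  · rfl
  · simp only [pvDfsA, h, if_true]

-- the children A recurses on, as a list of cells
def pvChil (garden : List (List String)) (rowLen colLen : Int) (cur : Int × Int) :
    List (Int × Int) :=
  ((pvDirsA.filter (fun d => pvIsValid garden cur (pvNbr cur d) rowLen colLen)).map (pvNbr cur))

theorem pvDfsA_succ_not_mem (garden : List (List String)) (rowLen colLen : Int) (f : Nat)
    (vis : PySem.Set (Int × Int)) (cur : Int × Int) (h : PySem.Set.contains vis cur = false) :
    pvDfsA garden rowLen colLen (f + 1) vis cur =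
      (pvChil garden rowLen colLen cur).foldl (pvDfsA garden rowLen colLen f)
        (PySem.Set.add vis cur) := by
  simp only [pvDfsA, h, Bool.false_eq_true, if_false, pvChil, List.foldl_map]
  exact PySem.List.foldl_if_eq_foldl_filter _ _ _ _

theorem pvChil_mem_univ {garden : List (List String)} {rowLen colLen : Int}
    {univ : List (Int × Int)}
    (hvalid : ∀ cur n, pvIsValid garden cur n rowLen colLen = true → n ∈ univ)
    {cur x : Int × Int} (hx : x ∈ pvChil garden rowLen colLen cur) : x ∈ univ := by
  simp only [pvChil, List.mem_map, List.mem_filter] at hx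
  obtain ⟨d, ⟨_, hv⟩, rfl⟩ := hx
  exact hvalid cur _ hv

-- every child of cur has cur's plant
theorem pvChil_cell {garden : List (List String)} {rowLen colLen : Int}
    {cur x : Int × Int} (hx : x ∈ pvChil garden rowLen colLen cur) :
    pvCell garden x = pvCell garden cur := by
  simp only [pvChil, List.mem_map, List.mem_filter] at hx
  obtain ⟨d, ⟨_, hv⟩, rfl⟩ := hx
  unfold pvIsValid at hv
  simp only [Bool.and_eq_true, beq_iff_eq] at hv
  exact hv.2

theorem pvDfsA_subset (garden : List (List String)) (rowLen colLen : Int) (f : Nat)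
    (vis : PySem.Set (Int × Int)) (cur : Int × Int) :
    vis ⊆ pvDfsA garden rowLen colLen f vis cur := by
  induction f generalizing vis cur with
  | zero => exact fun _ h => h
  | succ f ih =>
    by_cases h : PySem.Set.contains vis cur = true
    · rw [pvDfsA_of_mem garden rowLen colLen (f + 1) vis cur h]
      exact fun _ h => h
    · replace h : PySem.Set.contains vis cur = false := by
        cases hh : PySem.Set.contains vis cur
        · rfl
        · exact absurd hh h
      rw [pvDfsA_succ_not_mem garden rowLen colLen f vis cur h]
      refine List.Subset.trans (fun x hx => (PySem.Set.mem_add vis cur x).mpr (Or.inl hx))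
        (pvSubset_foldl ?_)
      intro a d _
      exact ih a d

-- Source B's neighbour push equals A's child list (prepended), given cur has the start's plant
theorem pvStep_eq (garden : List (List String)) (rows cols : Int) (start cur : Int × Int)
    (st : List (Int × Int)) (h : pvCell garden cur = pvCell garden start) :
    pvStep (pvOk garden rows cols start) cur.1 cur.2 st =
      pvChil garden rows cols cur ++ st := by
  have hok : ∀ d : Int × Int, pvOk garden rows cols start (pvNbr cur d)
      = pvIsValid garden cur (pvNbr cur d) rows cols :=
    fun d => (pvOk_eq_isValid_cur garden rows cols start cur (pvNbr cur d) h).symm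
  obtain ⟨r, c⟩ := cur
  have e1 : ((r : Int), c - 1) = pvNbr (r, c) (0, -1) := by simp [pvNbr, sub_eq_add_neg]
  have e2 : ((r : Int), c + 1) = pvNbr (r, c) (0, 1) := by simp [pvNbr, sub_eq_add_neg]
  have e3 : (r - 1, (c : Int)) = pvNbr (r, c) (-1, 0) := by simp [pvNbr, sub_eq_add_neg]
  have e4 : (r + 1, (c : Int)) = pvNbr (r, c) (1, 0) := by simp [pvNbr, sub_eq_add_neg]
  simp only [pvStep, List.foldl_cons, List.foldl_nil, e1, e2, e3, e4, hok,
    pvChil, pvDirsA]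
  cases h1 : pvIsValid garden (r, c) (pvNbr (r, c) (1, 0)) rows cols <;>
    cases h2 : pvIsValid garden (r, c) (pvNbr (r, c) (-1, 0)) rows cols <;>
      cases h3 : pvIsValid garden (r, c) (pvNbr (r, c) (0, 1)) rows cols <;>
        cases h4 : pvIsValid garden (r, c) (pvNbr (r, c) (0, -1)) rows cols <;>
          simp [h1, h2, h3, h4]

-- fuel irrelevance for A's dfs: any fuel ≥ the number of unvisited cells gives the same result
theorem pvDfsA_fuel (garden : List (List String)) (rowLen colLen : Int)
    (univ : List (Int × Int))
    (hvalid : ∀ cur n, pvIsValid garden cur n rowLen colLen = true → n ∈ univ) :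
    ∀ k, ∀ (vis : PySem.Set (Int × Int)) (cur : Int × Int) (f : Nat), cur ∈ univ →
    pvU univ vis ≤ k → k ≤ f →
    pvDfsA garden rowLen colLen f vis cur = pvDfsA garden rowLen colLen k vis cur := by
  intro k
  induction k using Nat.strongRecOn with
  | ind k IH =>
    intro vis cur f hcur hU hkf
    by_cases h : PySem.Set.contains vis cur = true
    · rw [pvDfsA_of_mem _ _ _ _ _ _ h, pvDfsA_of_mem _ _ _ _ _ _ h]
    · replace h : PySem.Set.contains vis cur = false := by
        cases hh : PySem.Set.contains vis cur
        · rfl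
        · exact absurd hh h
      have hnv : cur ∉ vis := pvContains_false.mp h
      have hpos := pvU_pos hcur hnv
      obtain ⟨k0, rfl⟩ : ∃ k0, k = k0 + 1 := ⟨k - 1, by omega⟩
      obtain ⟨f0, rfl⟩ : ∃ f0, f = f0 + 1 := ⟨f - 1, by omega⟩
      rw [pvDfsA_succ_not_mem _ _ _ _ _ _ h, pvDfsA_succ_not_mem _ _ _ _ _ _ h]
      refine pvFoldl_congr_inv (fun v => pvU univ v ≤ k0) _ _ _ _ ?_ ?_ ?_
      · have := pvU_dec hcur hnv
        omega
      · intro a x hPa _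
        exact le_trans (pvU_mono (pvDfsA_subset garden _ _ f0 a x)) hPa
      · intro a x hPa hx
        have hxu : x ∈ univ := pvChil_mem_univ hvalid hx
        exact IH k0 (by omega) a x f0 hxu hPa (by omega)

-- unfolding equations for the stack loop
theorem pvFill_nil (ok : Int × Int → Bool) (f : Nat)
    (vis : PySem.Set (Int × Int)) : pvFill ok f vis [] = vis :=
  pvFill.eq_1 ok f vis

theorem pvFill_cons_mem (ok : Int × Int → Bool) (f : Nat)
    (vis : PySem.Set (Int × Int)) (c : Int × Int) (st : List (Int × Int))
    (h : PySem.Set.contains vis c = true) :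
    pvFill ok f vis (c :: st) = pvFill ok f vis st := by
  cases f
  · rw [pvFill.eq_2, if_pos h]
  · rw [pvFill.eq_3, if_pos h]

theorem pvFill_cons_not_mem (ok : Int × Int → Bool) (f : Nat)
    (vis : PySem.Set (Int × Int)) (c : Int × Int) (st : List (Int × Int))
    (h : PySem.Set.contains vis c = false) :
    pvFill ok (f + 1) vis (c :: st) =
      pvFill ok f (PySem.Set.add vis c) (pvStep ok c.1 c.2 st) := by
  rw [pvFill.eq_3, if_neg (by rw [h]; exact Bool.noConfusion)]

-- the main simulation: the stack fill computes the fold of A's dfs over the stack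
theorem pvFill_eq_foldl (garden : List (List String)) (rows cols : Int) (start : Int × Int)
    (univ : List (Int × Int))
    (hvalid : ∀ cur n, pvIsValid garden cur n rows cols = true → n ∈ univ) :
    ∀ k fs fa, k ≤ fs → k ≤ fa →
    ∀ (st : List (Int × Int)) (vis : PySem.Set (Int × Int)),
    (∀ x ∈ st, x ∈ univ ∧ pvCell garden x = pvCell garden start) → pvU univ vis ≤ k →
    pvFill (pvOk garden rows cols start) fs vis st =
      st.foldl (pvDfsA garden rows cols fa) vis := by
  intro k
  induction k using Nat.strongRecOn with
  | ind k IH =>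
    intro fs fa hkfs hkfa st
    induction st with
    | nil => intro vis _ _; rw [pvFill_nil]; rfl
    | cons c st' ihst =>
      intro vis hst hU
      by_cases h : PySem.Set.contains vis c = true
      · rw [pvFill_cons_mem _ _ _ _ _ h, List.foldl_cons, pvDfsA_of_mem _ _ _ _ _ _ h]
        exact ihst vis (fun x hx => hst x (by simp [hx])) hU
      · replace h : PySem.Set.contains vis c = false := by
          cases hh : PySem.Set.contains vis c
          · rfl
          · exact absurd hh h
        have hcu : c ∈ univ := (hst c (by simp)).1
        have hcell : pvCell garden c = pvCell garden start := (hst c (by simp)).2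
        have hnv : c ∉ vis := pvContains_false.mp h
        have hpos := pvU_pos hcu hnv
        obtain ⟨k0, rfl⟩ : ∃ k0, k = k0 + 1 := ⟨k - 1, by omega⟩
        obtain ⟨fs0, rfl⟩ : ∃ fs0, fs = fs0 + 1 := ⟨fs - 1, by omega⟩
        obtain ⟨fa0, rfl⟩ : ∃ fa0, fa = fa0 + 1 := ⟨fa - 1, by omega⟩
        have hUadd : pvU univ (PySem.Set.add vis c) ≤ k0 := by
          have := pvU_dec hcu hnv
          omega
        rw [pvFill_cons_not_mem _ _ _ _ _ h, pvStep_eq garden rows cols start c st' hcell]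
        rw [IH k0 (by omega) fs0 fa0 (by omega) (by omega) _ _
          (by
            intro x hx
            rcases List.mem_append.mp hx with hx | hx
            · exact ⟨pvChil_mem_univ hvalid hx, (pvChil_cell hx).trans hcell⟩
            · exact hst x (by simp [hx]))
          hUadd]
        rw [List.foldl_append, List.foldl_cons, pvDfsA_succ_not_mem _ _ _ _ _ _ h]
        refine pvFoldl_congr_inv (fun v => pvU univ v ≤ k0) _ _ _ _ ?_ ?_ ?_
        · refine le_trans (pvU_mono ?_) hUadd
          refine pvSubset_foldl ?_
          intro a x _
          exact pvDfsA_subset garden _ _ fa0 a x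
        · intro a x hPa _
          exact le_trans (pvU_mono (pvDfsA_subset garden _ _ fa0 a x)) hPa
        · intro a x hPa hx
          have hxu : x ∈ univ := (hst x (by simp [hx])).1
          rw [pvDfsA_fuel garden _ _ univ hvalid k0 a x fa0 hxu hPa (by omega),
            pvDfsA_fuel garden _ _ univ hvalid k0 a x (fa0 + 1) hxu hPa (by omega)]

-- A's one-pair step equals adding Source B's corner contribution
theorem pvPairStep (ok : Int × Int → Bool) (s : Int) (n1 n2 nd : Int × Int) :
    (if !(ok n1) && !(ok n2) then s + 1
     else if ok n1 && ok n2 then (if !(ok nd) then s + 1 else s) else s)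
    = s + (let a := ok n1; let b := ok n2;
           if a != b then 0 else if !a then 1 else if ok nd then 0 else 1) := by
  cases h1 : ok n1 <;> cases h2 : ok n2 <;> cases h3 : ok nd <;> simp

-- A's sides loop equals the sum of Source B's corner contributions
theorem pvSides_eq (garden : List (List String)) (start : Int × Int) (rows cols : Int)
    (vis : List (Int × Int)) :
    pvSidesA garden start rows cols vis =
      (vis.flatMap (fun ij => pvCornerDirs.map
        (fun d => pvCorner (pvOk garden rows cols start) ij.1 ij.2 d.1 d.2))).sum := by
  have hok : ∀ p, pvIsValid garden start p rows cols = pvOk garden rows cols start p :=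
    fun p => (pvOk_eq_isValid garden rows cols start p).symm
  have hcell : ∀ (ij : Int × Int) (s : Int),
      pvPairs.foldl (fun sides pr =>
        if !(pvIsValid garden start (pvNbr ij pr.1) rows cols)
            && !(pvIsValid garden start (pvNbr ij pr.2) rows cols) then sides + 1
        else if pvIsValid garden start (pvNbr ij pr.1) rows cols
            && pvIsValid garden start (pvNbr ij pr.2) rows cols then
          if !(pvIsValid garden start (ij.1 + pr.1.1, ij.2 + pr.2.2) rows cols)
          then sides + 1 else sides
        else sides) s
      = s + (pvCornerDirs.map
          (fun d => pvCorner (pvOk garden rows cols start) ij.1 ij.2 d.1 d.2)).sum := by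
    intro ij s
    obtain ⟨i, j⟩ := ij
    simp only [pvPairs, pvCornerDirs, List.foldl_cons, List.foldl_nil, List.map_cons,
      List.map_nil, List.sum_cons, List.sum_nil, hok, pvPairStep, pvCorner, pvNbr]
    norm_num
    ring
  unfold pvSidesA
  induction vis with
  | nil => simp
  | cons ij t iht =>
    simp only [List.foldl_cons, List.flatMap_cons, List.sum_append]
    rw [hcell ij 0]
    have gen : ∀ (s : Int) (l : List (Int × Int)),
        l.foldl (fun sides ij =>
          pvPairs.foldl (fun sides pr =>
            if !(pvIsValid garden start (pvNbr ij pr.1) rows cols)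
                && !(pvIsValid garden start (pvNbr ij pr.2) rows cols) then sides + 1
            else if pvIsValid garden start (pvNbr ij pr.1) rows cols
                && pvIsValid garden start (pvNbr ij pr.2) rows cols then
              if !(pvIsValid garden start (ij.1 + pr.1.1, ij.2 + pr.2.2) rows cols)
              then sides + 1 else sides
            else sides) sides) s
        = s + (l.flatMap (fun ij => pvCornerDirs.map
            (fun d => pvCorner (pvOk garden rows cols start) ij.1 ij.2 d.1 d.2))).sum := by
      intro s l
      induction l generalizing s with
      | nil => simp
      | cons x xs ihx =>
        simp only [List.foldl_cons, List.flatMap_cons, List.sum_append]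
        rw [hcell x s, ihx]
        ring
    rw [gen]
    ring

-- ===== VERDICT (by name: the statement is the Claim_ definition above) =====
theorem travel_part_two_spec : Claim_equal_travel_part_two := by
  intro garden coordinate _ _
  unfold Spec_travel_part_two travel_part_two travel_part_two_alt
  dsimp only
  have hvalid : ∀ cur n, pvIsValid garden cur n (garden.length : Int)
      (((PySem.List.pyGet? garden 0).getD []).length : Int) = true →
      n ∈ coordinate :: pvAll garden.length ((PySem.List.pyGet? garden 0).getD []).length := by
    intro cur n hv
    simp only [pvIsValid, Bool.and_eq_true, decide_eq_true_eq] at hv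
    exact List.mem_cons_of_mem _ (pvMem_all.mpr ⟨hv.1.1.1.1, hv.1.1.1.2, hv.1.1.2, hv.1.2⟩)
  have hfill := pvFill_eq_foldl garden (garden.length : Int)
    (((PySem.List.pyGet? garden 0).getD []).length : Int) coordinate
    (coordinate :: pvAll garden.length ((PySem.List.pyGet? garden 0).getD []).length) hvalid
    (garden.length * ((PySem.List.pyGet? garden 0).getD []).length + 1)
    (garden.length * ((PySem.List.pyGet? garden 0).getD []).length + 2)
    (garden.length * ((PySem.List.pyGet? garden 0).getD []).length + 2)
    (by omega) (by omega) [coordinate] PySem.Set.empty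
    (by
      intro x hx
      rw [List.mem_singleton] at hx
      subst hx
      exact ⟨List.mem_cons_self, rfl⟩)
    (by
      have hle := List.length_filter_le (fun p => !PySem.Set.contains PySem.Set.empty p)
        (coordinate :: pvAll garden.length ((PySem.List.pyGet? garden 0).getD []).length)
      have hlen := pvAll_length garden.length ((PySem.List.pyGet? garden 0).getD []).length
      unfold pvU
      simp only [List.length_cons] at hle ⊢
      omega)
  rw [hfill, List.foldl_cons, List.foldl_nil, pvSides_eq]
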